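-- pv_equiv track=rewrite | github.com/Nivram3/Rosalind | Bioinformatics Stronghold/Overlap Graphs.py | k_edges
-- ===== SOURCE A (Python) =====
-- import itertools
--
-- def is_k_overlap(s1, s2, k=3):
--     return s1[-k:] == s2[:k]
--
-- def k_edges(data, k):
--     edges = []
--     for u,v in itertools.combinations(data, 2):
--         u_dna, v_dna = data[u], data[v]
--
--         if is_k_overlap(u_dna, v_dna, k):
--             edges.append((u,v))
--
--         if is_k_overlap(v_dna, u_dna, k):
--             edges.append((v,u))
--
--     return edges
-- ===== SOURCE B (Python) =====
-- def k_edges(data, k):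
--     items = list(data.items())
--     pre = {}   # k-prefix -> positions (increasing)
--     suf = {}   # k-suffix -> positions (increasing)
--     for i, (name, dna) in enumerate(items):
--         pre.setdefault(dna[:k], []).append(i)
--         suf.setdefault(dna[-k:], []).append(i)
--     edges = []
--     for i, (u, u_dna) in enumerate(items):
--         fwd = [j for j in pre.get(u_dna[-k:], []) if j > i]
--         bwd = [j for j in suf.get(u_dna[:k], []) if j > i]
--         a = b = 0
--         while a < len(fwd) or b < len(bwd):
--             if b == len(bwd) or (a < len(fwd) and fwd[a] <= bwd[b]):
--                 j = fwd[a]; a += 1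
--                 edges.append((u, items[j][0]))
--                 if b < len(bwd) and bwd[b] == j:
--                     edges.append((items[j][0], u)); b += 1
--             else:
--                 j = bwd[b]; b += 1
--                 edges.append((items[j][0], u))
--     return edges
-- ===== Notes on version B (the rewrite author's own statement) =====
-- stated objective: faster
-- what changed: Instead of testing every unordered pair of nodes in both directions (quadratic in the number of strings with a k-char comparison each), B builds two hash indexes (k-prefix -> positions, k-suffix -> positions) in one pass, and for each node merges the two position-sorted match lists to emit edges in A's exact pair order.
import Mathlib
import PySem

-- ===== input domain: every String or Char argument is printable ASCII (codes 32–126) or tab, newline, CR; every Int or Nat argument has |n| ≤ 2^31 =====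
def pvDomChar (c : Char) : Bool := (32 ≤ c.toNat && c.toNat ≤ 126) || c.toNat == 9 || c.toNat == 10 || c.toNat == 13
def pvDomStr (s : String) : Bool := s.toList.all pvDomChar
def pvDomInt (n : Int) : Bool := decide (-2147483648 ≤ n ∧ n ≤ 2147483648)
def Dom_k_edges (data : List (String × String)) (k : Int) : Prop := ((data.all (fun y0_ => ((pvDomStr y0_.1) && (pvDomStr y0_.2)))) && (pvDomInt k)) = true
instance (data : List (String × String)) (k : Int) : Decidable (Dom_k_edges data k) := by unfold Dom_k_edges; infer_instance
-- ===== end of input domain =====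

-- B replaces A's all-pairs double test (O(n^2·k)) by two hash indexes (k-prefix/k-suffix -> positions)
-- built in one pass, merging the two position-sorted match lists per node to emit edges in A's exact order (O(n·k + edges)).

-- ===== PORT A =====
-- s2[:k]
def pvPre (s : String) (k : Int) : List Char := PySem.List.slice s.toList none (some k)
-- s1[-k:]
def pvSuf (s : String) (k : Int) : List Char := PySem.List.slice s.toList (some (-k)) none

-- itertools.combinations(l, 2), in itertools order
def pvComb2 {α : Type} : List α → List (α × α)
  | [] => []
  | x :: xs => xs.map (fun y => (x, y)) ++ pvComb2 xs

def k_edges (data : List (String × String)) (k : Int) : List (String × String) :=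
  let d := PySem.Dict.ofList data
  (pvComb2 d.keys).foldl (fun edges uv =>
    let u_dna := d.getD uv.1 ""
    let v_dna := d.getD uv.2 ""
    let e1 := if pvSuf u_dna k = pvPre v_dna k then edges ++ [(uv.1, uv.2)] else edges
    if pvSuf v_dna k = pvPre u_dna k then e1 ++ [(uv.2, uv.1)] else e1) []

-- ===== PORT B =====
-- the two-pointer merge loop of Source B: emit (u, items[j][0]) for forward matches, (items[j][0], u)
-- for backward matches, in increasing j, forward first on a tie
def pvMergeEmit (items : List (String × String)) (u : String) : List Int → List Int → List (String × String)
  | a :: fwd, b :: bwd =>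
    if a ≤ b then
      if a = b then
        (u, (PySem.List.pyGetD items a ("", "")).1) :: ((PySem.List.pyGetD items a ("", "")).1, u)
          :: pvMergeEmit items u fwd bwd
      else (u, (PySem.List.pyGetD items a ("", "")).1) :: pvMergeEmit items u fwd (b :: bwd)
    else ((PySem.List.pyGetD items b ("", "")).1, u) :: pvMergeEmit items u (a :: fwd) bwd
  | a :: fwd, [] => (u, (PySem.List.pyGetD items a ("", "")).1) :: pvMergeEmit items u fwd []
  | [], b :: bwd => ((PySem.List.pyGetD items b ("", "")).1, u) :: pvMergeEmit items u [] bwd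
  | [], [] => []
termination_by fwd bwd => fwd.length + bwd.length

def k_edges_alt (data : List (String × String)) (k : Int) : List (String × String) :=
  let d := PySem.Dict.ofList data
  let items := d.items
  let en := PySem.List.enumerate items 0
  let pre := en.foldl (fun m e => m.modify (pvPre e.2.2 k) [] (· ++ [e.1])) PySem.Dict.empty
  let suf := en.foldl (fun m e => m.modify (pvSuf e.2.2 k) [] (· ++ [e.1])) PySem.Dict.empty
  en.foldl (fun edges e =>
    let fwd := (pre.getD (pvSuf e.2.2 k) []).filter (fun j => e.1 < j)
    let bwd := (suf.getD (pvPre e.2.2 k) []).filter (fun j => e.1 < j)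
    edges ++ pvMergeEmit items e.2.1 fwd bwd) []

-- ===== PRECONDITION & SPEC =====
def Spec_k_edges (data : List (String × String)) (k : Int) (out : List (String × String)) : Prop := out = k_edges_alt data k
instance (data : List (String × String)) (k : Int) (out : List (String × String)) : Decidable (Spec_k_edges data k out) := by unfold Spec_k_edges; infer_instance

-- ===== CLAIM (what is proved, stated in full; the proofs are below) =====
def Claim_equal_k_edges : Prop := ∀ (data : List (String × String)) (k : Int), Dom_k_edges data k → Spec_k_edges data k (k_edges data k)

-- ===== LEMMAS AND PROOFS =====

-- the per-ordered-pair emission both programs perform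
def pvEmit (k : Int) (p y : String × String) : List (String × String) :=
  (if pvSuf p.2 k = pvPre y.2 k then [(p.1, y.1)] else []) ++
  (if pvSuf y.2 k = pvPre p.2 k then [(y.1, p.1)] else [])

-- common canonical form: for each position i, emit against every later position
def pvCanon (k : Int) (items : List (String × String)) : List (String × String) :=
  (PySem.List.enumerate items 0).flatMap
    (fun e => (items.drop (e.1.toNat + 1)).flatMap (fun y => pvEmit k e.2 y))

lemma pv_flatMap_congr {α β : Type} {l : List α} {f g : α → List β}
    (h : ∀ x ∈ l, f x = g x) : l.flatMap f = l.flatMap g := by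
  rw [List.flatMap_def, List.flatMap_def, List.map_congr_left h]

lemma pv_enumerate_shift {α : Type} (l : List α) (s : Int) :
    PySem.List.enumerate l (s + 1) = (PySem.List.enumerate l s).map (fun e => (e.1 + 1, e.2)) := by
  induction l generalizing s with
  | nil => simp [PySem.List.enumerate_nil]
  | cons x xs ih => simp [PySem.List.enumerate_cons, ih]

lemma pv_enumerate_nonneg {α : Type} (l : List α) (s : Int) :
    ∀ e ∈ PySem.List.enumerate l s, s ≤ e.1 := by
  induction l generalizing s with
  | nil => simp [PySem.List.enumerate_nil]
  | cons x xs ih =>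
    intro e he
    rw [PySem.List.enumerate_cons] at he
    rcases List.mem_cons.mp he with he | he
    · simp [he]
    · have := ih (s+1) e he; omega

lemma pv_enumerate_spec {α : Type} (l : List α) (d0 : α) (s : Int) :
    ∀ e ∈ PySem.List.enumerate l s,
      s ≤ e.1 ∧ e.1 - s < l.length ∧ PySem.List.pyGetD l (e.1 - s) d0 = e.2 := by
  induction l generalizing s with
  | nil => simp [PySem.List.enumerate_nil]
  | cons x xs ih =>
    intro e he
    rw [PySem.List.enumerate_cons] at he
    rcases List.mem_cons.mp he with he | he
    · subst he
      refine ⟨le_refl _, by simp, ?_⟩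
      simp [PySem.List.pyGetD_zero_cons]
    · obtain ⟨h1, h2, h3⟩ := ih (s+1) e he
      refine ⟨by omega, by simp; omega, ?_⟩
      rw [show e.1 - s = (((e.1 - s).toNat : Nat) : Int) by omega, PySem.List.pyGetD_natCast,
        show (e.1 - s).toNat = (e.1 - (s+1)).toNat + 1 by omega, List.getD_cons_succ]
      rw [show e.1 - (s+1) = (((e.1 - (s+1)).toNat : Nat) : Int) by omega,
        PySem.List.pyGetD_natCast] at h3
      exact h3

lemma pv_comb2_map {α β : Type} (f : α → β) (l : List α) :
    pvComb2 (l.map f) = (pvComb2 l).map (fun pq => (f pq.1, f pq.2)) := by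
  induction l with
  | nil => rfl
  | cons x xs ih => simp [pvComb2, ih, Function.comp]

lemma pv_mem_comb2 {α : Type} {l : List α} {pq : α × α} (h : pq ∈ pvComb2 l) :
    pq.1 ∈ l ∧ pq.2 ∈ l := by
  induction l with
  | nil => simp [pvComb2] at h
  | cons x xs ih =>
    simp only [pvComb2, List.mem_append, List.mem_map] at h
    rcases h with ⟨y, hy, hEq⟩ | h
    · subst hEq; exact ⟨by simp, by simp [hy]⟩
    · obtain ⟨h1, h2⟩ := ih h
      exact ⟨by simp [h1], by simp [h2]⟩

lemma pv_comb2_flatMap {α β : Type} (h : α → α → List β) (l : List α) :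
    (pvComb2 l).flatMap (fun pq => h pq.1 pq.2) =
      (PySem.List.enumerate l 0).flatMap
        (fun e => (l.drop (e.1.toNat + 1)).flatMap (h e.2)) := by
  induction l with
  | nil => simp [pvComb2, PySem.List.enumerate_nil]
  | cons x xs ih =>
    rw [PySem.List.enumerate_cons, List.flatMap_cons, pv_enumerate_shift xs 0, List.flatMap_map,
      pvComb2, List.flatMap_append, List.flatMap_map]
    congr 1
    rw [ih]
    apply pv_flatMap_congr
    intro e he
    have h0 : 0 ≤ e.1 := pv_enumerate_nonneg xs 0 e he
    rw [show (e.1 + 1).toNat = e.1.toNat + 1 by omega, List.drop_succ_cons]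

lemma pv_pyRange_filter_lt (n i : Int) (h0 : 0 ≤ i) :
    (PySem.List.pyRange 0 n 1).filter (fun j => decide (i < j)) = PySem.List.pyRange (i + 1) n 1 := by
  by_cases hn : i + 1 ≤ n
  · rw [PySem.List.pyRange_one_append 0 (i+1) n (by omega) hn, List.filter_append]
    rw [List.filter_eq_nil_iff.mpr, List.filter_eq_self.mpr]
    · simp
    · intro x hx
      have := (PySem.List.mem_pyRange_one).mp hx
      simp; omega
    · intro x hx
      have := (PySem.List.mem_pyRange_one).mp hx
      simp; omega
  · rw [List.filter_eq_nil_iff.mpr, PySem.List.pyRange_one_eq_nil (show n ≤ i + 1 by omega)]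
    intro x hx
    have := (PySem.List.mem_pyRange_one).mp hx
    simp; omega

lemma pv_mergeEmit_cons_left (items : List (String × String)) (u : String) (j : Int)
    (fwd bwd : List Int) (h : ∀ x ∈ bwd, j < x) :
    pvMergeEmit items u (j :: fwd) bwd
      = (u, (PySem.List.pyGetD items j ("", "")).1) :: pvMergeEmit items u fwd bwd := by
  cases bwd with
  | nil => rw [pvMergeEmit]
  | cons b bs =>
    have hb : j < b := h b (by simp)
    rw [pvMergeEmit]
    rw [if_pos (by omega), if_neg (by omega)]

lemma pv_mergeEmit_cons_right (items : List (String × String)) (u : String) (j : Int)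
    (fwd bwd : List Int) (h : ∀ x ∈ fwd, j < x) :
    pvMergeEmit items u fwd (j :: bwd)
      = ((PySem.List.pyGetD items j ("", "")).1, u) :: pvMergeEmit items u fwd bwd := by
  cases fwd with
  | nil => rw [pvMergeEmit]
  | cons a as =>
    have ha : j < a := h a (by simp)
    rw [pvMergeEmit]
    rw [if_neg (by omega)]

lemma pv_mergeEmit_filter (items : List (String × String)) (u : String) (P Q : Int → Bool) :
    ∀ R : List Int, R.Pairwise (· < ·) →
      pvMergeEmit items u (R.filter P) (R.filter Q) =
        R.flatMap (fun j =>
          (if P j then [(u, (PySem.List.pyGetD items j ("", "")).1)] else []) ++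
          (if Q j then [((PySem.List.pyGetD items j ("", "")).1, u)] else [])) := by
  intro R
  induction R with
  | nil => intro _; rw [List.filter_nil, List.filter_nil, List.flatMap_nil, pvMergeEmit]
  | cons j R' ih =>
    intro hp
    have hj : ∀ x ∈ R', j < x := fun x hx => (List.pairwise_cons.mp hp).1 x hx
    have hp' := (List.pairwise_cons.mp hp).2
    rw [List.flatMap_cons]
    cases hP : P j <;> cases hQ : Q j <;>
      simp only [List.filter_cons, hP, hQ, Bool.false_eq_true, if_true, if_false]
    · rw [ih hp']; simp
    · rw [pv_mergeEmit_cons_right items u j _ _ (fun x hx => hj x (List.mem_of_mem_filter hx)),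
        ih hp']
      simp
    · rw [pv_mergeEmit_cons_left items u j _ _ (fun x hx => hj x (List.mem_of_mem_filter hx)),
        ih hp']
      simp
    · rw [pvMergeEmit, if_pos (le_refl j), if_pos rfl, ih hp']
      simp

lemma pv_idx_getD (k : Int) (key : String → Int → List Char)
    (l : List (Int × (String × String))) (c : List Char) :
    (l.foldl (fun m e => m.modify (key e.2.2 k) [] (· ++ [e.1])) PySem.Dict.empty).getD c []
      = (l.filter (fun e => key e.2.2 k == c)).map (·.1) := by
  have := PySem.Dict.getD_foldl_modify_append (l := l.map (fun e => (key e.2.2 k, e.1)))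
      (d := PySem.Dict.empty) (c := c)
  rw [List.foldl_map] at this
  simp only [this]
  rw [List.filter_map, List.map_map]
  simp [Function.comp_def, PySem.Dict.getD_empty]

lemma pv_a_eq_canon (data : List (String × String)) (k : Int) :
    k_edges data k = pvCanon k (PySem.Dict.ofList data).items := by
  simp only [k_edges]
  have hnd : (PySem.Dict.ofList data).keys.Nodup := PySem.Dict.nodup_keys_ofList data
  rw [PySem.List.foldl_congr_mem _ _
      (fun (edges : List (String × String)) (uv : String × String) => edges ++
        ((if pvSuf ((PySem.Dict.ofList data).getD uv.1 "") k = pvPre ((PySem.Dict.ofList data).getD uv.2 "") k then [(uv.1, uv.2)] else []) ++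
         (if pvSuf ((PySem.Dict.ofList data).getD uv.2 "") k = pvPre ((PySem.Dict.ofList data).getD uv.1 "") k then [(uv.2, uv.1)] else []))) []
      (by intro acc uv _; split_ifs <;> simp [*])]
  rw [PySem.List.foldl_append_eq_flatMap, List.nil_append]
  have hkeys : (PySem.Dict.ofList data).keys = (PySem.Dict.ofList data).items.map (fun p => p.1) := rfl
  rw [hkeys, pv_comb2_map, List.flatMap_map]
  have hmain : ∀ a ∈ pvComb2 (PySem.Dict.ofList data).items,
      ((fun uv =>
        (if pvSuf ((PySem.Dict.ofList data).getD uv.1 "") k = pvPre ((PySem.Dict.ofList data).getD uv.2 "") k then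
            [(uv.1, uv.2)]
          else []) ++
          if pvSuf ((PySem.Dict.ofList data).getD uv.2 "") k = pvPre ((PySem.Dict.ofList data).getD uv.1 "") k then
            [(uv.2, uv.1)]
          else []) ((a.1.1, a.2.1) : String × String))
        = pvEmit k a.1 a.2 := by
    intro a ha
    obtain ⟨h1, h2⟩ := pv_mem_comb2 ha
    have e1 : (PySem.Dict.ofList data).getD a.1.1 "" = a.1.2 :=
      PySem.Dict.getD_of_mem_items _ (by rw [Prod.mk.eta]; exact h1) hnd ""
    have e2 : (PySem.Dict.ofList data).getD a.2.1 "" = a.2.2 :=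
      PySem.Dict.getD_of_mem_items _ (by rw [Prod.mk.eta]; exact h2) hnd ""
    simp only [e1, e2, pvEmit]
  rw [pv_flatMap_congr hmain, pv_comb2_flatMap (fun p y => pvEmit k p y)]
  rfl

lemma pv_matchlist (items : List (String × String)) (key : String → Int → List Char)
    (k : Int) (c : List Char) (i : Int) (h0 : 0 ≤ i) :
    ((( PySem.List.enumerate items 0).foldl
        (fun m e => m.modify (key e.2.2 k) [] (· ++ [e.1])) PySem.Dict.empty).getD c []).filter
          (fun j => decide (i < j))
      = (PySem.List.pyRange (i + 1) (items.length : Int) 1).filter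
          (fun j => key (PySem.List.pyGetD items j ("", "")).2 k == c) := by
  rw [pv_idx_getD]
  have hcg : (PySem.List.enumerate items 0).filter (fun e => key e.2.2 k == c)
      = (PySem.List.enumerate items 0).filter
          ((fun j => key (PySem.List.pyGetD items j ("", "")).2 k == c) ∘ (fun e => e.1)) := by
    apply List.filter_congr
    intro e he
    obtain ⟨-, -, h3⟩ := pv_enumerate_spec items ("", "") 0 e he
    rw [sub_zero] at h3
    simp [h3]
  rw [hcg, ← List.filter_map, PySem.List.map_fst_enumerate, zero_add, List.filter_filter]
  rw [List.filter_congr (fun a _ => Bool.and_comm _ _), ← List.filter_filter,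
    pv_pyRange_filter_lt _ _ h0]

lemma pv_b_eq_canon (data : List (String × String)) (k : Int) :
    k_edges_alt data k = pvCanon k (PySem.Dict.ofList data).items := by
  simp only [k_edges_alt]
  rw [PySem.List.foldl_append_eq_flatMap, List.nil_append]
  simp only [pvCanon]
  apply pv_flatMap_congr
  intro e he
  obtain ⟨h1', h2', h3'⟩ := pv_enumerate_spec (PySem.Dict.ofList data).items ("", "") 0 e he
  rw [sub_zero] at h2' h3'
  rw [pv_matchlist _ pvPre k (pvSuf e.2.2 k) e.1 h1',
    pv_matchlist _ pvSuf k (pvPre e.2.2 k) e.1 h1',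
    pv_mergeEmit_filter _ _ _ _ _ (PySem.List.pairwise_lt_pyRange_one _ _)]
  have hbody : ∀ j : Int,
      ((if (pvPre (PySem.List.pyGetD (PySem.Dict.ofList data).items j ("", "")).2 k == pvSuf e.2.2 k) then
          [(e.2.1, (PySem.List.pyGetD (PySem.Dict.ofList data).items j ("", "")).1)] else []) ++
       (if (pvSuf (PySem.List.pyGetD (PySem.Dict.ofList data).items j ("", "")).2 k == pvPre e.2.2 k) then
          [((PySem.List.pyGetD (PySem.Dict.ofList data).items j ("", "")).1, e.2.1)] else []))
      = pvEmit k e.2 (PySem.List.pyGetD (PySem.Dict.ofList data).items j ("", "")) := by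
    intro j
    simp only [pvEmit]
    by_cases hc1 : pvSuf e.2.2 k = pvPre (PySem.List.pyGetD (PySem.Dict.ofList data).items j ("", "")).2 k <;>
      by_cases hc2 : pvSuf (PySem.List.pyGetD (PySem.Dict.ofList data).items j ("", "")).2 k = pvPre e.2.2 k
    · rw [if_pos (beq_iff_eq.mpr hc1.symm), if_pos (beq_iff_eq.mpr hc2), if_pos hc1, if_pos hc2]
    · rw [if_pos (beq_iff_eq.mpr hc1.symm), if_neg (fun hh => hc2 (beq_iff_eq.mp hh)),
        if_pos hc1, if_neg hc2]
    · rw [if_neg (fun hh => hc1 (beq_iff_eq.mp hh).symm), if_pos (beq_iff_eq.mpr hc2),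
        if_neg hc1, if_pos hc2]
    · rw [if_neg (fun hh => hc1 (beq_iff_eq.mp hh).symm), if_neg (fun hh => hc2 (beq_iff_eq.mp hh)),
        if_neg hc1, if_neg hc2]
  rw [pv_flatMap_congr (fun j _ => hbody j),
    ← List.flatMap_map (fun j => PySem.List.pyGetD (PySem.Dict.ofList data).items j ("", ""))
      (pvEmit k e.2),
    PySem.List.map_pyGetD_pyRange' _ ("", "") (show (0:Int) ≤ e.1 + 1 by omega),
    show (e.1 + 1).toNat = e.1.toNat + 1 by omega]

-- ===== VERDICT (by name: the statement is the Claim_ definition above) =====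
theorem k_edges_spec : Claim_equal_k_edges := by
  intro data k _
  unfold Spec_k_edges
  rw [pv_a_eq_canon, pv_b_eq_canon]
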